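-- pv_equiv track=rewrite | github.com/JAYESH-SOLMINDE/trialmatch | ai/matching/rule_engine.py | _conditions_match
-- ===== SOURCE A (Python) =====
-- CONDITION_KEYWORDS = {
--     "diabetes":       ["diabetes", "diabetic", "hba1c", "insulin", "glucose", "t2dm", "t1dm"],
--     "hypertension":   ["hypertension", "high blood pressure", "htn"],
--     "cancer":         ["cancer", "tumor", "oncology", "carcinoma", "lymphoma", "leukemia"],
--     "heart disease":  ["heart disease", "cardiac", "coronary", "heart failure", "cvd"],
--     "asthma":         ["asthma", "bronchial", "inhaler"],
--     "kidney disease": ["kidney disease", "renal", "nephropathy", "ckd"],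
--     "hiv":            ["hiv", "aids", "antiretroviral"],
--     "alzheimer":      ["alzheimer", "dementia", "cognitive decline"],
-- }
--
-- def _conditions_match(patient_cond: str, trial_cond: str) -> bool:
--     """Check if patient condition matches trial condition."""
--     for canonical, keywords in CONDITION_KEYWORDS.items():
--         patient_match = (
--             any(kw in patient_cond for kw in keywords)
--             or canonical in patient_cond
--         )
--         trial_match = (
--             any(kw in trial_cond for kw in keywords)
--             or canonical in trial_cond
--         )
--         if patient_match and trial_match:
--             return True
--     return patient_cond in trial_cond or trial_cond in patient_cond
-- ===== SOURCE B (Python) =====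
-- CONDITION_KEYWORDS = {
--     "diabetes":       ["diabetes", "diabetic", "hba1c", "insulin", "glucose", "t2dm", "t1dm"],
--     "hypertension":   ["hypertension", "high blood pressure", "htn"],
--     "cancer":         ["cancer", "tumor", "oncology", "carcinoma", "lymphoma", "leukemia"],
--     "heart disease":  ["heart disease", "cardiac", "coronary", "heart failure", "cvd"],
--     "asthma":         ["asthma", "bronchial", "inhaler"],
--     "kidney disease": ["kidney disease", "renal", "nephropathy", "ckd"],
--     "hiv":            ["hiv", "aids", "antiretroviral"],
--     "alzheimer":      ["alzheimer", "dementia", "cognitive decline"],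
-- }
--
-- # Flat inverted index: every search term (keyword or canonical name) paired with its category.
-- _KEYWORD_INDEX = [(kw, canonical)
--                   for canonical, keywords in CONDITION_KEYWORDS.items()
--                   for kw in keywords + [canonical]]
--
-- def _conditions_match(patient_cond: str, trial_cond: str) -> bool:
--     """Check if patient condition matches trial condition."""
--     masks = {}  # category -> bitmask: 1 = seen in patient_cond, 2 = seen in trial_cond
--     for kw, canonical in _KEYWORD_INDEX:
--         bit = (1 if kw in patient_cond else 0) | (2 if kw in trial_cond else 0)
--         if bit:
--             m = masks.get(canonical, 0) | bit
--             if m == 3: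
--                 return True
--             masks[canonical] = m
--     return patient_cond in trial_cond or trial_cond in patient_cond
-- ===== Notes on version B (the rewrite author's own statement) =====
-- stated objective: alternative
-- what changed: Replaces A's per-category loop (testing both strings against each category's keyword list, early-returning on a category matching both) by a single pass over a flat (search-term, category) inverted index that accumulates per-category bitmasks (1 = term seen in patient_cond, 2 = seen in trial_cond) in a dict and returns True as soon as some category's mask reaches 3; the bidirectional substring fallback is unchanged.
import Mathlib
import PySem

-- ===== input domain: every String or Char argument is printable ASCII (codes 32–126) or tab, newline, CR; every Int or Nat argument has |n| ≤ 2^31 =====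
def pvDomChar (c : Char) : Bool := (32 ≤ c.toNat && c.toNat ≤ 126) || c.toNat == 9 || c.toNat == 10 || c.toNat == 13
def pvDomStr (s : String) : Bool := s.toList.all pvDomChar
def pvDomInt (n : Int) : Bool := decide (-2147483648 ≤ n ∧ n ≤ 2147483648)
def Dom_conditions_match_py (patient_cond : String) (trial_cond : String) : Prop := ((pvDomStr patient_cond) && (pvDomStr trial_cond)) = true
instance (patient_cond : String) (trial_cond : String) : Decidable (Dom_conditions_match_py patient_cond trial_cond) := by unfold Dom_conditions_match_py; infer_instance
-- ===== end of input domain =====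

-- B replaces A's per-category loop (testing both strings against each category's keyword list
-- with early return) by a single pass over a flat (search-term, category) inverted index that
-- accumulates per-category bitmasks (1 = seen in patient, 2 = seen in trial) in a dict and
-- returns True as soon as a mask reaches 3; the substring fallback is unchanged (objective: alternative).

-- CONDITION_KEYWORDS as an association list in insertion order (shared module constant)
def condKeywords : List (String × List String) :=
  [("diabetes",       ["diabetes", "diabetic", "hba1c", "insulin", "glucose", "t2dm", "t1dm"]),
   ("hypertension",   ["hypertension", "high blood pressure", "htn"]),
   ("cancer",         ["cancer", "tumor", "oncology", "carcinoma", "lymphoma", "leukemia"]),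
   ("heart disease",  ["heart disease", "cardiac", "coronary", "heart failure", "cvd"]),
   ("asthma",         ["asthma", "bronchial", "inhaler"]),
   ("kidney disease", ["kidney disease", "renal", "nephropathy", "ckd"]),
   ("hiv",            ["hiv", "aids", "antiretroviral"]),
   ("alzheimer",      ["alzheimer", "dementia", "cognitive decline"])]

-- ===== PORT A =====
-- A's loop over CONDITION_KEYWORDS.items() with early return; the [] case is the code after the loop
def condLoopA (patient_cond trial_cond : String) : List (String × List String) → Bool
  | [] => PySem.Str.isIn patient_cond trial_cond || PySem.Str.isIn trial_cond patient_cond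
  | (canonical, keywords) :: rest =>
    let patient_match := keywords.any (fun kw => PySem.Str.isIn kw patient_cond)
                         || PySem.Str.isIn canonical patient_cond
    let trial_match := keywords.any (fun kw => PySem.Str.isIn kw trial_cond)
                       || PySem.Str.isIn canonical trial_cond
    if patient_match && trial_match then true
    else condLoopA patient_cond trial_cond rest

def conditions_match_py (patient_cond : String) (trial_cond : String) : Bool :=
  condLoopA patient_cond trial_cond condKeywords

-- ===== PORT B =====
-- B's module constant _KEYWORD_INDEX: the flat inverted index (term, category)
def keywordIndex : List (String × String) :=
  condKeywords.flatMap (fun it => (it.2 ++ [it.1]).map (fun kw => (kw, it.1)))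

-- the bitmask contribution of one search term: 1 if in patient_cond, | 2 if in trial_cond
def bitOf (patient_cond trial_cond kw : String) : Nat :=
  (if PySem.Str.isIn kw patient_cond then 1 else 0) |||
  (if PySem.Str.isIn kw trial_cond then 2 else 0)

-- B's for-loop over _KEYWORD_INDEX with the masks dict as accumulator; [] = the fallback after the loop
def condLoopB (patient_cond trial_cond : String) (masks : PySem.Dict String Nat) :
    List (String × String) → Bool
  | [] => PySem.Str.isIn patient_cond trial_cond || PySem.Str.isIn trial_cond patient_cond
  | q :: rest =>
    let bit := bitOf patient_cond trial_cond q.1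
    if bit ≠ 0 then
      let m := masks.getD q.2 0 ||| bit
      if m = 3 then true
      else condLoopB patient_cond trial_cond (masks.insert q.2 m) rest
    else condLoopB patient_cond trial_cond masks rest

def conditions_match_py_alt (patient_cond : String) (trial_cond : String) : Bool :=
  condLoopB patient_cond trial_cond PySem.Dict.empty keywordIndex

-- ===== PRECONDITION & SPEC =====
def Spec_conditions_match_py (patient_cond : String) (trial_cond : String) (out : Bool) : Prop := out = conditions_match_py_alt patient_cond trial_cond
instance (patient_cond : String) (trial_cond : String) (out : Bool) : Decidable (Spec_conditions_match_py patient_cond trial_cond out) := by unfold Spec_conditions_match_py; infer_instance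

-- ===== CLAIM (what is proved, stated in full; the proofs are below) =====
def Claim_equal_conditions_match_py : Prop := ∀ (patient_cond : String) (trial_cond : String), Dom_conditions_match_py patient_cond trial_cond → Spec_conditions_match_py patient_cond trial_cond (conditions_match_py patient_cond trial_cond)

-- ===== LEMMAS AND PROOFS =====

-- per-category match predicate for one string: some search term (keyword or name) occurs in cond
def condMatches (cond : String) (it : String × List String) : Bool :=
  it.2.any (fun kw => PySem.Str.isIn kw cond) || PySem.Str.isIn it.1 cond

-- A's loop = "some category matches both strings" ∨ fallback
theorem condLoopA_eq_any (p t : String) (items : List (String × List String)) :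
    condLoopA p t items =
      (items.any (fun it => condMatches p it && condMatches t it)
        || (PySem.Str.isIn p t || PySem.Str.isIn t p)) := by
  induction items with
  | nil => simp [condLoopA]
  | cons it rest ih =>
    obtain ⟨c, kws⟩ := it
    simp only [condLoopA, List.any_cons, condMatches, ih]
    cases h : ((kws.any (fun kw => PySem.Str.isIn kw p) || PySem.Str.isIn c p)
        && (kws.any (fun kw => PySem.Str.isIn kw t) || PySem.Str.isIn c t)) <;> simp

-- OR of the bitmask contributions of all index entries whose category is c
def orAcc (p t c : String) (pairs : List (String × String)) : Nat :=
  pairs.foldr (fun q a => if q.2 = c then bitOf p t q.1 ||| a else a) 0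

theorem bitOf_lt_four (p t kw : String) : bitOf p t kw < 4 := by
  unfold bitOf; split_ifs <;> decide

theorem orAcc_lt_four (p t c : String) (pairs : List (String × String)) :
    orAcc p t c pairs < 4 := by
  induction pairs with
  | nil => simp [orAcc]
  | cons q rest ih =>
    simp only [orAcc, List.foldr_cons] at *
    split
    · exact Nat.or_lt_two_pow (n := 2) (bitOf_lt_four p t q.1) ih
    · exact ih

theorem orAcc_cons (p t c : String) (q : String × String) (rest : List (String × String)) :
    orAcc p t c (q :: rest) =
      if q.2 = c then bitOf p t q.1 ||| orAcc p t c rest else orAcc p t c rest := rfl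

theorem orAcc_of_not_mem (p t c : String) (pairs : List (String × String))
    (h : c ∉ pairs.map Prod.snd) : orAcc p t c pairs = 0 := by
  induction pairs with
  | nil => rfl
  | cons q rest ih =>
    simp only [List.map_cons, List.mem_cons, not_or] at h
    rw [orAcc_cons, if_neg (fun hq => h.1 hq.symm)]
    exact ih h.2

theorem three_or_eq (x : Nat) (h : x < 4) : 3 ||| x = 3 := by
  interval_cases x <;> rfl

-- B's loop = "some index entry's category has combined mask 3" ∨ fallback (invariant: no stored mask is 3)
theorem condLoopB_eq_any (p t : String) (pairs : List (String × String)) :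
    ∀ (masks : PySem.Dict String Nat), (∀ c, masks.getD c 0 < 3) →
    condLoopB p t masks pairs =
      (pairs.any (fun q => masks.getD q.2 0 ||| orAcc p t q.2 pairs == 3)
        || (PySem.Str.isIn p t || PySem.Str.isIn t p)) := by
  induction pairs with
  | nil => intro masks _; simp [condLoopB]
  | cons q rest ih =>
    intro masks hinv
    obtain ⟨kw, c⟩ := q
    simp only [condLoopB, List.any_cons]
    by_cases hb : bitOf p t kw = 0
    · rw [if_neg (by simp [hb])]
      rw [ih masks hinv]
      have hterm : ∀ q' ∈ rest,
          (masks.getD q'.2 0 ||| orAcc p t q'.2 ((kw, c) :: rest) == 3) =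
          (masks.getD q'.2 0 ||| orAcc p t q'.2 rest == 3) := by
        intro q' _
        rw [orAcc_cons]
        split
        · rw [hb, Nat.zero_or]
        · rfl
      rw [PySem.List.any_congr_mem hterm]
      rw [orAcc_cons, if_pos rfl, hb, Nat.zero_or]
      by_cases hc : c ∈ rest.map Prod.snd
      · cases hh : (masks.getD c 0 ||| orAcc p t c rest == 3)
        · simp
        · obtain ⟨q', hq', hq2⟩ := List.mem_map.mp hc
          have : rest.any (fun q => masks.getD q.2 0 ||| orAcc p t q.2 rest == 3) = true :=
            List.any_eq_true.mpr ⟨q', hq', by rw [hq2]; exact hh⟩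
          simp [this]
      · rw [orAcc_of_not_mem p t c rest hc]
        have : (masks.getD c 0 ||| 0 == 3) = false := by
          simp only [Nat.or_zero, beq_eq_false_iff_ne]
          exact Nat.ne_of_lt (hinv c)
        rw [this, Bool.false_or]
    · rw [if_pos (by simp [hb])]
      by_cases hm : masks.getD c 0 ||| bitOf p t kw = 3
      · rw [if_pos hm]
        have : (masks.getD c 0 ||| orAcc p t c ((kw, c) :: rest) == 3) = true := by
          rw [orAcc_cons, if_pos rfl, ← Nat.or_assoc, hm,
            three_or_eq _ (orAcc_lt_four p t c rest)]
          exact beq_self_eq_true 3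
        simp [this]
      · rw [if_neg hm]
        have hmlt : masks.getD c 0 ||| bitOf p t kw < 3 := by
          have h4 : masks.getD c 0 ||| bitOf p t kw < 4 :=
            Nat.or_lt_two_pow (n := 2) (Nat.lt_trans (hinv c) (by decide)) (bitOf_lt_four p t kw)
          omega
        have hinv' : ∀ c', (masks.insert c (masks.getD c 0 ||| bitOf p t kw)).getD c' 0 < 3 := by
          intro c'
          rw [PySem.Dict.getD_insert]
          split
          · exact hmlt
          · exact hinv c'
        rw [ih _ hinv']
        have hterm : ∀ q' ∈ rest,
            ((masks.insert c (masks.getD c 0 ||| bitOf p t kw)).getD q'.2 0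
                ||| orAcc p t q'.2 rest == 3) =
            (masks.getD q'.2 0 ||| orAcc p t q'.2 ((kw, c) :: rest) == 3) := by
          intro q' _
          rw [PySem.Dict.getD_insert, orAcc_cons]
          by_cases hq : q'.2 = c
          · rw [if_pos hq, if_pos hq.symm, hq, Nat.or_assoc]
          · rw [if_neg hq, if_neg (fun h => hq h.symm)]
        rw [PySem.List.any_congr_mem hterm]
        have hhead : (masks.getD c 0 ||| orAcc p t c ((kw, c) :: rest) == 3) =
            (masks.getD c 0 ||| bitOf p t kw ||| orAcc p t c rest == 3) := by
          rw [orAcc_cons, if_pos rfl, Nat.or_assoc]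
        rw [hhead]
        by_cases hc : c ∈ rest.map Prod.snd
        · cases hh : (masks.getD c 0 ||| bitOf p t kw ||| orAcc p t c rest == 3)
          · simp
          · obtain ⟨q', hq', hq2⟩ := List.mem_map.mp hc
            have : rest.any (fun q => masks.getD q.2 0 ||| orAcc p t q.2 ((kw, c) :: rest) == 3)
                = true := by
              refine List.any_eq_true.mpr ⟨q', hq', ?_⟩
              rw [orAcc_cons, if_pos hq2.symm, hq2, ← Nat.or_assoc]
              exact hh
            simp [this]
        · rw [orAcc_of_not_mem p t c rest hc]
          have : (masks.getD c 0 ||| bitOf p t kw ||| 0 == 3) = false := by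
            simp only [Nat.or_zero, beq_eq_false_iff_ne]
            exact hm
          rw [this, Bool.false_or]

-- orAcc distributes over ++
theorem orAcc_append (p t c : String) (xs ys : List (String × String)) :
    orAcc p t c (xs ++ ys) = orAcc p t c xs ||| orAcc p t c ys := by
  induction xs with
  | nil => simp [orAcc]
  | cons q rest ih =>
    rw [List.cons_append, orAcc_cons, orAcc_cons, ih]
    split
    · rw [Nat.or_assoc]
    · rfl

-- orAcc over one category's block: its own category collects all its bits, other categories contribute 0
theorem orAcc_map_self (p t c : String) (l : List String) :
    orAcc p t c (l.map (fun kw => (kw, c))) =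
      l.foldr (fun kw a => bitOf p t kw ||| a) 0 := by
  induction l with
  | nil => rfl
  | cons kw rest ih => rw [List.map_cons, orAcc_cons, if_pos rfl, ih]; rfl

theorem orAcc_map_other (p t c c' : String) (l : List String) (h : c' ≠ c) :
    orAcc p t c (l.map (fun kw => (kw, c'))) = 0 := by
  apply orAcc_of_not_mem
  simp
  exact fun x _ => h

-- an ite with an || condition splits as the ||| of two ites
theorem bit_ite_or (a b : Bool) (u : Nat) :
    (if (a || b) then u else 0) = ((if a then u else 0) ||| (if b then u else 0)) := by
  cases a <;> cases b <;> simp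

-- the bit-fold over a term list = (any term in p → bit 1) | (any term in t → bit 2)
theorem foldr_bitOf_eq (p t : String) (l : List String) :
    l.foldr (fun kw a => bitOf p t kw ||| a) 0 =
      ((if l.any (fun kw => PySem.Str.isIn kw p) then 1 else 0) |||
       (if l.any (fun kw => PySem.Str.isIn kw t) then 2 else 0)) := by
  induction l with
  | nil => simp
  | cons kw rest ih =>
    rw [List.foldr_cons, ih, List.any_cons, List.any_cons, bit_ite_or, bit_ite_or]
    simp only [bitOf]
    ac_rfl

-- combined: the index-wide mask of category it equals 3 iff both strings match it
theorem orAcc_keywordIndex (p t : String) (it : String × List String) (hmem : it ∈ condKeywords) :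
    (orAcc p t it.1 keywordIndex == 3) = (condMatches p it && condMatches t it) := by
  have hnd : (condKeywords.map Prod.fst).Nodup := by decide
  have hblock : orAcc p t it.1 keywordIndex =
      (it.2 ++ [it.1]).foldr (fun kw a => bitOf p t kw ||| a) 0 := by
    unfold keywordIndex
    generalize hL : condKeywords = L at hmem hnd
    clear hL
    induction L with
    | nil => cases hmem
    | cons j rest ih =>
      rw [List.flatMap_cons, orAcc_append]
      simp only [List.map_cons, List.nodup_cons] at hnd
      rcases List.mem_cons.mp hmem with h | h
      · subst h
        rw [orAcc_map_self]
        have : orAcc p t it.1 (rest.flatMap fun j => (j.2 ++ [j.1]).map fun kw => (kw, j.1)) = 0 := by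
          apply orAcc_of_not_mem
          simp only [List.map_flatMap, List.mem_flatMap, not_exists, not_and]
          intro j hj hin
          simp only [List.map_map, List.mem_map] at hin
          obtain ⟨kw, _, hkw⟩ := hin
          exact hnd.1 (hkw ▸ List.mem_map_of_mem hj)
        rw [this, Nat.or_zero]
      · rw [orAcc_map_other p t it.1 j.1 _ (by
          intro he
          exact hnd.1 (he ▸ List.mem_map_of_mem h)), Nat.zero_or]
        exact ih h hnd.2
  rw [hblock, foldr_bitOf_eq]
  simp only [condMatches, List.any_append, List.any_cons, List.any_nil, Bool.or_false]
  cases hp : it.2.any (fun kw => PySem.Str.isIn kw p) || PySem.Str.isIn it.1 p <;>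
    cases ht : it.2.any (fun kw => PySem.Str.isIn kw t) || PySem.Str.isIn it.1 t <;> rfl

-- any over the flat index of a per-category predicate = any over the categories
theorem any_keywordIndex (g : String → Bool) :
    keywordIndex.any (fun q => g q.2) = condKeywords.any (fun it => g it.1) := by
  unfold keywordIndex
  rw [List.any_flatMap]
  apply PySem.List.any_congr_mem
  intro it _
  rw [List.any_map]
  simp [Function.comp]

-- ===== VERDICT (by name: the statement is the Claim_ definition above) =====
theorem conditions_match_py_spec : Claim_equal_conditions_match_py := by
  intro p t _
  unfold Spec_conditions_match_py conditions_match_py conditions_match_py_alt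
  rw [condLoopA_eq_any,
    condLoopB_eq_any p t keywordIndex PySem.Dict.empty (by intro c; simp [PySem.Dict.getD_empty])]
  congr 1
  have : (fun q : String × String => PySem.Dict.empty.getD q.2 0 ||| orAcc p t q.2 keywordIndex == 3)
      = (fun q : String × String => orAcc p t q.2 keywordIndex == 3) := by
    funext q; rw [PySem.Dict.getD_empty, Nat.zero_or]
  rw [this, any_keywordIndex (fun c => orAcc p t c keywordIndex == 3)]
  exact PySem.List.any_congr_mem (fun it hmem => (orAcc_keywordIndex p t it hmem).symm)
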